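-- pv_equiv track=rewrite | github.com/landian60/OpenClaw-LiveAsset | scripts/real-config.py | normalize_endpoint_id
-- ===== SOURCE A (Python) =====
-- def normalize_endpoint_id(raw: str) -> str:
--     trimmed = raw.strip().lower()
--     if not trimmed:
--         return ""
--     out = []
--     last_dash = False
--     for ch in trimmed:
--         keep = ("a" <= ch <= "z") or ("0" <= ch <= "9") or ch == "-"
--         next_ch = ch if keep else "-"
--         if next_ch == "-":
--             if last_dash:
--                 continue
--             last_dash = True
--         else:
--             last_dash = False
--         out.append(next_ch)
--     return "".join(out).strip("-")
-- ===== SOURCE B (Python) =====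
-- def normalize_endpoint_id(raw: str) -> str:
--     trimmed = raw.strip().lower()
--     segs = []
--     cur = []
--     for ch in trimmed:
--         if ("a" <= ch <= "z") or ("0" <= ch <= "9"):
--             cur.append(ch)
--         else:
--             if cur:
--                 segs.append("".join(cur))
--                 cur = []
--     if cur:
--         segs.append("".join(cur))
--     return "-".join(segs)
-- ===== Notes on version B (the rewrite author's own statement) =====
-- stated objective: alternative
-- what changed: Instead of emitting characters one by one while maintaining a last_dash flag and then stripping dashes off both ends, B accumulates maximal alphanumeric segments into a list and joins the segments with single dashes, so no dash-collapsing or end-stripping step exists.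
import Mathlib
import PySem

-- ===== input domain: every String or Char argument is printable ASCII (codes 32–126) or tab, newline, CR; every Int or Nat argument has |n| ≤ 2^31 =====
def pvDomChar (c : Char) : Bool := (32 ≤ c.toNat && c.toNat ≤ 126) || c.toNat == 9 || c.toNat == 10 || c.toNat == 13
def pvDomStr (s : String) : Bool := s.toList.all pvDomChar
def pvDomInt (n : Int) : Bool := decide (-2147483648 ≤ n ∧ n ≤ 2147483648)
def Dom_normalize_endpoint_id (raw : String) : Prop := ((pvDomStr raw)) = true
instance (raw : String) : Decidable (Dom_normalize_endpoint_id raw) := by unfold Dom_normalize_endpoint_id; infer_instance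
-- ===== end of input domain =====

-- B replaces A's character-by-character emission with a last_dash flag (plus a final
-- strip('-')) by collecting maximal alphanumeric segments and joining them with '-'.

-- ===== PORT A =====
-- the for-loop over trimmed with state (out, last_dash); out is built front-to-back
def pvLoopA : List Char → Bool → List Char
  | [], _ => []
  | c :: cs, last_dash =>
    let keep := (decide ('a' ≤ c ∧ c ≤ 'z') || decide ('0' ≤ c ∧ c ≤ '9')) || (c == '-')
    let next := if keep then c else '-'
    if next == '-' then
      if last_dash then pvLoopA cs last_dash
      else '-' :: pvLoopA cs true
    else next :: pvLoopA cs false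

def normalize_endpoint_id (raw : String) : String :=
  let trimmed := PySem.Str.lower (PySem.Str.strip raw)
  if trimmed = "" then ""
  else String.mk (PySem.Chars.stripChars (pvLoopA trimmed.toList false) ['-'])

-- ===== PORT B =====
-- the for-loop over trimmed with state (segs, cur): cur collects the current alphanumeric
-- run, which is flushed into segs at each non-alphanumeric character and once at the end
def pvSegsB : List Char → List Char → List (List Char)
  | [], cur => if cur.isEmpty then [] else [cur]
  | c :: cs, cur =>
    if decide ('a' ≤ c ∧ c ≤ 'z') || decide ('0' ≤ c ∧ c ≤ '9') then pvSegsB cs (cur ++ [c])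
    else if cur.isEmpty then pvSegsB cs cur
    else cur :: pvSegsB cs []

def normalize_endpoint_id_alt (raw : String) : String :=
  let trimmed := PySem.Str.lower (PySem.Str.strip raw)
  String.mk (PySem.Chars.join ['-'] (pvSegsB trimmed.toList []))

-- ===== PRECONDITION & SPEC =====
def Spec_normalize_endpoint_id (raw : String) (out : String) : Prop := out = normalize_endpoint_id_alt raw
instance (raw : String) (out : String) : Decidable (Spec_normalize_endpoint_id raw out) := by unfold Spec_normalize_endpoint_id; infer_instance

-- ===== CLAIM (what is proved, stated in full; the proofs are below) =====
def Claim_equal_normalize_endpoint_id : Prop := ∀ (raw : String), Dom_normalize_endpoint_id raw → Spec_normalize_endpoint_id raw (normalize_endpoint_id raw)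

-- ===== LEMMAS AND PROOFS =====

-- the alphanumeric test shared by the analysis (defeq to the conditions in both ports)
def pvIsAl (c : Char) : Bool := decide ('a' ≤ c ∧ c ≤ 'z') || decide ('0' ≤ c ∧ c ≤ '9')

-- the character predicate that stripChars ['-'] tests (defeq to its internal p)
def pvDash (c : Char) : Bool := (['-'] : List Char).contains c

theorem pvIsAl_ne_dash {c : Char} (h : pvIsAl c = true) : c ≠ '-' := by
  intro e; subst e; exact absurd h (by decide)

theorem pvDash_eq (c : Char) : pvDash c = (c == '-') := by
  simp only [pvDash, List.contains_cons, List.contains_nil, Bool.or_false]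

theorem pvLoopA_cons (c : Char) (cs : List Char) (ld : Bool) :
    pvLoopA (c :: cs) ld =
      if pvIsAl c then c :: pvLoopA cs false
      else if ld then pvLoopA cs ld else '-' :: pvLoopA cs true := by
  by_cases h3 : c = '-'
  · subst h3; cases ld <;> rfl
  · have h3' : (c == '-') = false := by simp [h3]
    by_cases h1 : 'a' ≤ c ∧ c ≤ 'z' <;> by_cases h2 : '0' ≤ c ∧ c ≤ '9' <;>
      simp [pvLoopA, pvIsAl, h1, h2, h3']

theorem pvSegsB_cons (c : Char) (cs cur : List Char) :
    pvSegsB (c :: cs) cur =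
      if pvIsAl c then pvSegsB cs (cur ++ [c])
      else if cur.isEmpty then pvSegsB cs cur else cur :: pvSegsB cs [] := rfl

-- every segment pvSegsB emits is nonempty
theorem pvSegsB_ne_nil : ∀ (cs cur : List Char), ∀ s ∈ pvSegsB cs cur, s ≠ [] := by
  intro cs
  induction cs with
  | nil =>
      intro cur s hs
      by_cases h : cur.isEmpty <;> simp [pvSegsB, h] at hs
      · subst hs; simpa using h
  | cons c cs ih =>
      intro cur s hs
      rw [pvSegsB_cons] at hs
      by_cases h : pvIsAl c
      · exact ih _ s (by simpa [h] using hs)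
      · by_cases hc : cur.isEmpty
        · exact ih _ s (by simpa [h, hc] using hs)
        · rcases (by simpa [h, hc] using hs : s = cur ∨ s ∈ pvSegsB cs []) with rfl | hmem
          · simpa using hc
          · exact ih _ s hmem

theorem pvJoin_ne_nil {segs : List (List Char)} (h : ∀ s ∈ segs, s ≠ []) (hne : segs ≠ []) :
    PySem.Chars.join ['-'] segs ≠ [] := by
  match segs with
  | [] => exact absurd rfl hne
  | [a] => simpa [PySem.Chars.join_singleton] using h a (by simp)
  | a :: b :: r =>
      rw [PySem.Chars.join_cons_cons]
      have := h a (by simp)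
      simp [this]

-- rdropWhile unfolded on a cons cell
theorem pvRdropWhile_cons (p : Char → Bool) (c : Char) (l : List Char) :
    List.rdropWhile p (c :: l) =
      if List.rdropWhile p l = [] then (if p c then [] else [c])
      else c :: List.rdropWhile p l := by
  rw [List.rdropWhile, List.reverse_cons, List.dropWhile_append]
  by_cases hd : List.rdropWhile p l = []
  · have : List.dropWhile p l.reverse = [] := by
      have := congrArg List.reverse hd
      simpa [List.rdropWhile] using this
    by_cases hp : p c <;> simp [this, hp, List.rdropWhile]
  · have : ¬ List.dropWhile p l.reverse = [] := by
      intro e; exact hd (by simp [List.rdropWhile, e])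
    simp [List.isEmpty_iff, this, List.rdropWhile]

theorem pvRdropWhile_cons_of_neg (p : Char → Bool) {c : Char} (hc : p c = false) (l : List Char) :
    List.rdropWhile p (c :: l) = c :: List.rdropWhile p l := by
  rw [pvRdropWhile_cons]
  by_cases hd : List.rdropWhile p l = [] <;> simp [hd, hc]

-- pvLoopA started with last_dash = true never emits a leading dash
theorem pvDropWhile_loopA_true : ∀ cs : List Char,
    List.dropWhile pvDash (pvLoopA cs true) = pvLoopA cs true := by
  intro cs
  induction cs with
  | nil => simp [pvLoopA]
  | cons c cs ih =>
      rw [pvLoopA_cons]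
      by_cases h : pvIsAl c
      · have : pvDash c = false := by
          rw [pvDash_eq]; simp [pvIsAl_ne_dash h]
        simp [h, this]
      · simpa [h] using ih

-- dropping the leading dash of pvLoopA cs false gives pvLoopA cs true
theorem pvDropWhile_loopA_false : ∀ cs : List Char,
    List.dropWhile pvDash (pvLoopA cs false) = pvLoopA cs true := by
  intro cs
  cases cs with
  | nil => simp [pvLoopA]
  | cons c cs =>
      rw [pvLoopA_cons, pvLoopA_cons]
      by_cases h : pvIsAl c
      · have : pvDash c = false := by
          rw [pvDash_eq]; simp [pvIsAl_ne_dash h]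
        simp [h, this]
      · have : pvDash '-' = true := by decide
        simp [h, this, pvDropWhile_loopA_true cs]

-- MAIN INVARIANT: the joined segments equal A's collapsed output with the
-- leading dash (state true) resp. the current segment prefix (state cur) accounted for
theorem pvMain : ∀ cs : List Char,
    (PySem.Chars.join ['-'] (pvSegsB cs []) = List.rdropWhile pvDash (pvLoopA cs true)) ∧
    (∀ cur : List Char, cur ≠ [] →
      PySem.Chars.join ['-'] (pvSegsB cs cur) = cur ++ List.rdropWhile pvDash (pvLoopA cs false)) := by
  intro cs
  induction cs with
  | nil =>
      constructor
      · simp [pvSegsB, pvLoopA, PySem.Chars.join_nil, List.rdropWhile_nil]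
      · intro cur hcur
        simp [pvSegsB, pvLoopA, List.isEmpty_iff, hcur, PySem.Chars.join_singleton,
          List.rdropWhile_nil]
  | cons c cs ih =>
      have hdash : pvDash '-' = true := by decide
      constructor
      · rw [pvSegsB_cons, pvLoopA_cons]
        by_cases h : pvIsAl c
        · have hc : pvDash c = false := by rw [pvDash_eq]; simp [pvIsAl_ne_dash h]
          rw [if_pos h, if_pos h]
          simp only [List.nil_append]
          rw [ih.2 [c] (by simp), pvRdropWhile_cons_of_neg pvDash hc]
          simp
        · simpa [h, List.isEmpty_iff] using ih.1
      · intro cur hcur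
        rw [pvSegsB_cons, pvLoopA_cons]
        by_cases h : pvIsAl c
        · have hc : pvDash c = false := by rw [pvDash_eq]; simp [pvIsAl_ne_dash h]
          rw [if_pos h, if_pos h, ih.2 (cur ++ [c]) (by simp),
            pvRdropWhile_cons_of_neg pvDash hc]
          simp
        · rw [if_neg h, if_neg h, if_neg (by simp : ¬ (false = true)),
            if_neg (by simpa [List.isEmpty_iff] using hcur)]
          by_cases hseg : pvSegsB cs [] = []
          · have hrd : List.rdropWhile pvDash (pvLoopA cs true) = [] := by
              rw [← ih.1, hseg, PySem.Chars.join_nil]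
            rw [hseg, PySem.Chars.join_singleton, pvRdropWhile_cons, hrd, if_pos rfl,
              if_pos hdash]
            simp
          · have hne : PySem.Chars.join ['-'] (pvSegsB cs []) ≠ [] :=
              pvJoin_ne_nil (pvSegsB_ne_nil cs []) hseg
            have hrd : List.rdropWhile pvDash (pvLoopA cs true) ≠ [] := by
              rw [← ih.1]; exact hne
            obtain ⟨s, rest, hsr⟩ : ∃ s rest, pvSegsB cs [] = s :: rest := by
              cases hs : pvSegsB cs [] with
              | nil => exact absurd hs hseg
              | cons a r => exact ⟨a, r, rfl⟩
            rw [hsr, PySem.Chars.join_cons_cons, ← hsr, ih.1, pvRdropWhile_cons,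
              if_neg hrd]
            simp

theorem pvStripChars_eq (l : List Char) :
    PySem.Chars.stripChars l ['-'] = List.rdropWhile pvDash (List.dropWhile pvDash l) := rfl

-- ===== VERDICT (by name: the statement is the Claim_ definition above) =====
theorem normalize_endpoint_id_spec : Claim_equal_normalize_endpoint_id := by
  intro raw _
  unfold Spec_normalize_endpoint_id normalize_endpoint_id normalize_endpoint_id_alt
  by_cases he : PySem.Str.lower (PySem.Str.strip raw) = ""
  · simp [he, pvSegsB, PySem.Chars.join_nil]
    rfl
  · rw [if_neg he]
    refine congrArg String.mk ?_
    rw [pvStripChars_eq, pvDropWhile_loopA_false, ← (pvMain _).1]
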